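-- pv_equiv track=rewrite | github.com/MrBrantCode/unitest_baseline | mut_generate/mist_train_cf/cf_43930/solution.py | handle_time_series_data
-- ===== SOURCE A (Python) =====
-- def handle_time_series_data(data, window_size):
--     """
--     This function segments time-series data into time-bound segments using windowing techniques.
--
--     Parameters:
--     data (list): A list of time-series data.
--     window_size (int): The size of the window.
--
--     Returns:
--     list: A list of time-bound segments.
--     """
--     # Initialize an empty list to store the segments
--     segments = []
--
--     # Calculate the number of segments
--     num_segments = len(data) // window_size
--
--     # Iterate over the data and create segments
--     for i in range(num_segments):
--         # Calculate the start and end indices of the current segment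
--         start = i * window_size
--         end = (i + 1) * window_size
--
--         # Append the current segment to the list of segments
--         segments.append(data[start:end])
--
--     # Return the list of segments
--     return segments
-- ===== SOURCE B (Python) =====
-- def handle_time_series_data(data, window_size):
--     # One scatter pass: pre-allocate the full windows, send each element to its bucket i // window_size.
--     num_segments = len(data) // window_size
--     segments = [[] for _ in range(num_segments)]
--     for i, x in enumerate(data):
--         g = i // window_size
--         if 0 <= g < num_segments:
--             segments[g].append(x)
--     return segments
-- ===== Notes on version B (the rewrite author's own statement) =====
-- stated objective: alternative
-- what changed: Replaces the per-window index-arithmetic slicing loop by a single scatter pass over enumerate(data) that appends each element to its pre-allocated bucket i // window_size, dropping trailing partial-window elements.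
import Mathlib
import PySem

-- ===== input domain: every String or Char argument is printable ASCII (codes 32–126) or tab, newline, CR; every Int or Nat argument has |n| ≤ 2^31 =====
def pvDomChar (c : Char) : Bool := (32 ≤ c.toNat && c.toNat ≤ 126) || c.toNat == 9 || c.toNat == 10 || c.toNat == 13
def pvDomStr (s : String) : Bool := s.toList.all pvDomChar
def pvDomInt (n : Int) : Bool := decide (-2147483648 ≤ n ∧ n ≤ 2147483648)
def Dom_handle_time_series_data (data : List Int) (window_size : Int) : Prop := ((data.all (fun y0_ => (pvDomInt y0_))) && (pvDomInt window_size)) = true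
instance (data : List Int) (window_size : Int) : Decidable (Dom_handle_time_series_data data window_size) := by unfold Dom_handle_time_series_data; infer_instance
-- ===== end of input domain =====

-- B replaces A's per-window slicing loop by one scatter pass appending each element to its bucket i // window_size (same cost, different decomposition).

-- ===== PORT A =====
def handle_time_series_data (data : List Int) (window_size : Int) : List (List Int) :=
  (PySem.List.pyRange 0 (PySem.Int.floordiv (data.length : Int) window_size) 1).foldl
    (fun segments i =>
      segments ++ [PySem.List.slice data (some (i * window_size)) (some ((i + 1) * window_size))]) []

-- ===== PORT B =====
def handle_time_series_data_alt (data : List Int) (window_size : Int) : List (List Int) :=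
  (PySem.List.enumerate data 0).foldl
    (fun segments ix =>
      let g := PySem.Int.floordiv ix.1 window_size
      if 0 ≤ g ∧ g < PySem.Int.floordiv (data.length : Int) window_size then
        segments.set g.toNat (segments.getD g.toNat [] ++ [ix.2])
      else segments)
    (List.replicate (PySem.Int.floordiv (data.length : Int) window_size).toNat [])

-- ===== PRECONDITION & SPEC =====
-- Pre_ excludes exactly window_size = 0, where the Python A (and B) raise ZeroDivisionError.
def Pre_handle_time_series_data (data : List Int) (window_size : Int) : Prop := window_size ≠ 0
instance (data : List Int) (window_size : Int) : Decidable (Pre_handle_time_series_data data window_size) := by unfold Pre_handle_time_series_data; infer_instance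
def pvWitness_handle_time_series_data : List Int × Int := ([1, 2, 3, 4, 5], 2)

def Spec_handle_time_series_data (data : List Int) (window_size : Int) (out : List (List Int)) : Prop := out = handle_time_series_data_alt data window_size
instance (data : List Int) (window_size : Int) (out : List (List Int)) : Decidable (Spec_handle_time_series_data data window_size out) := by unfold Spec_handle_time_series_data; infer_instance

-- ===== CLAIM (what is proved, stated in full; the proofs are below) =====
def Claim_equal_handle_time_series_data : Prop := ∀ (data : List Int) (window_size : Int), Dom_handle_time_series_data data window_size → Pre_handle_time_series_data data window_size → Spec_handle_time_series_data data window_size (handle_time_series_data data window_size)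

-- ===== LEMMAS AND PROOFS =====

-- Negative window: the bucket condition can never hold, so B's fold is the identity.
lemma scatter_fold_nonpos (ws num : Int) (hnum : num ≤ 0) :
    ∀ (l : List (Int × Int)) (segs : List (List Int)),
      l.foldl (fun segments ix =>
        let g := PySem.Int.floordiv ix.1 ws
        if 0 ≤ g ∧ g < num then
          segments.set g.toNat (segments.getD g.toNat [] ++ [ix.2])
        else segments) segs = segs := by
  intro l
  induction l with
  | nil => intro segs; rfl
  | cons p l ih =>
      intro segs
      simp only [List.foldl_cons]
      rw [if_neg (by intro h; omega)]
      exact ih segs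

lemma set_map_range {α : Type} (k j : Nat) (f : Nat → α) (v : α) :
    ((List.range k).map f).set j v = (List.range k).map (fun i => if i = j then v else f i) := by
  apply List.ext_getElem
  · simp
  · intro n h1 h2
    simp only [List.getElem_set, List.getElem_map, List.getElem_range]
    by_cases h : j = n
    · simp [h]
    · rw [if_neg h, if_neg (Ne.symm h)]

-- One element with absolute index m lands in bucket m / w (if that bucket exists) and nowhere else.
lemma bucket_step (w m g : Nat) (hw : 0 < w) (data : List Int) (hm : m < data.length) :
    ((data.take (m + 1)).drop (g * w)).take w
      = if g = m / w then ((data.take m).drop (g * w)).take w ++ [data[m]]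
        else ((data.take m).drop (g * w)).take w := by
  have htake : data.take (m + 1) = data.take m ++ [data[m]] := by
    rw [List.take_add_one]
    simp [List.getElem?_eq_getElem hm]
  have hlen : (data.take m).length = m := by simp [Nat.min_eq_left hm.le]
  have hdm : m / w * w + m % w = m := by rw [Nat.mul_comm]; exact Nat.div_add_mod m w
  have hmod : m % w < w := Nat.mod_lt m hw
  have hlend : ((data.take m).drop (g * w)).length = m - g * w := by simp [hlen]
  rw [htake, List.drop_append, List.take_append, hlen, hlend]
  by_cases hg : g = m / w
  · subst hg
    rw [if_pos rfl]
    have h2 : m / w * w - m = 0 := by omega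
    rw [h2]
    simp only [List.drop_zero]
    congr 1
    exact List.take_of_length_le (by simp; omega)
  · rw [if_neg hg]
    rcases Nat.lt_or_ge g (m / w) with hlt | hge
    · -- bucket before m's: already full, nothing appended
      have h1 : g * w + w ≤ m / w * w := by
        calc g * w + w = (g + 1) * w := by ring
          _ ≤ m / w * w := Nat.mul_le_mul_right w (by omega)
      have h2 : w - (m - g * w) = 0 := by omega
      simp [h2]
    · have hgt : m / w < g := lt_of_le_of_ne hge (fun h => hg h.symm)
      have h1 : m / w * w + w ≤ g * w := by
        calc m / w * w + w = (m / w + 1) * w := by ring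
          _ ≤ g * w := Nat.mul_le_mul_right w (by omega)
      have h2 : [data[m]].drop (g * w - m) = [] := List.drop_eq_nil_of_le (by simp; omega)
      simp [h2]

-- Invariant of B's scatter pass: after the elements of index < m are processed, bucket g holds
-- exactly the first w elements past position g*w of the prefix data.take m.
lemma scatter_fold_pos (w k : Nat) (hw : 0 < w) (data : List Int) :
    ∀ (t m : Nat), data.length - m = t → m ≤ data.length →
      (PySem.List.enumerate (data.drop m) (m : Int)).foldl
        (fun segments ix =>
          let g := PySem.Int.floordiv ix.1 (w : Int)
          if 0 ≤ g ∧ g < (k : Int) then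
            segments.set g.toNat (segments.getD g.toNat [] ++ [ix.2])
          else segments)
        ((List.range k).map (fun g => ((data.take m).drop (g * w)).take w))
      = (List.range k).map (fun g => (data.drop (g * w)).take w) := by
  intro t
  induction t with
  | zero =>
      intro m h0 hle
      have hm : m = data.length := by omega
      subst hm
      rw [List.drop_length]
      simp [PySem.List.enumerate, List.take_of_length_le (le_refl data.length)]
  | succ t ih =>
      intro m h0 hle
      have hm : m < data.length := by omega
      rw [List.drop_eq_getElem_cons hm, PySem.List.enumerate_cons, List.foldl_cons]
      have hstep :
          (let g := PySem.Int.floordiv (m : Int) (w : Int)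
           if 0 ≤ g ∧ g < (k : Int) then
             (((List.range k).map (fun g => ((data.take m).drop (g * w)).take w)).set g.toNat
               ((((List.range k).map (fun g => ((data.take m).drop (g * w)).take w)).getD g.toNat []) ++ [data[m]]))
           else ((List.range k).map (fun g => ((data.take m).drop (g * w)).take w)))
          = (List.range k).map (fun g => ((data.take (m + 1)).drop (g * w)).take w) := by
        simp only [PySem.Int.floordiv_natCast]
        by_cases hk : m / w < k
        · rw [if_pos (by constructor <;> [positivity; exact_mod_cast hk])]
          rw [Int.toNat_natCast, PySem.List.getD_map_range _ _ _ _ hk, set_map_range]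
          apply List.ext_getElem (by simp)
          intro n h1 h2
          simp only [List.getElem_map, List.getElem_range]
          rw [bucket_step w m n hw data hm]
          by_cases h : n = m / w <;> simp [h]
        · rw [if_neg (by intro h; exact hk (by exact_mod_cast h.2))]
          apply List.ext_getElem (by simp)
          intro n h1 h2
          simp only [List.getElem_map, List.getElem_range]
          rw [bucket_step w m n hw data hm, if_neg]
          intro h
          exact hk (h ▸ (by simpa using h1))
      rw [hstep]
      have : ((m : Int) + 1) = ((m + 1 : Nat) : Int) := by push_cast; ring
      rw [this]
      exact ih (m + 1) (by omega) (by omega)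

-- ===== VERDICT (by name: the statement is the Claim_ definition above) =====
theorem handle_time_series_data_spec : Claim_equal_handle_time_series_data := by
  intro data window_size _ hpre
  unfold Spec_handle_time_series_data handle_time_series_data handle_time_series_data_alt
  rcases lt_or_gt_of_ne hpre with hneg | hpos
  · -- negative window: both sides are []
    have hnum : PySem.Int.floordiv (data.length : Int) window_size ≤ 0 := by
      have h1 := PySem.Int.floordiv_mul_add_mod (data.length : Int) window_size
      have h2 := (PySem.Int.mod_neg_bounds (a := (data.length : Int)) hneg)
      nlinarith [Int.natCast_nonneg data.length]
    rw [PySem.List.pyRange_one_eq_nil hnum, scatter_fold_nonpos _ _ hnum]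
    simp [Int.toNat_of_nonpos hnum]
  · -- positive window
    obtain ⟨w, rfl⟩ : ∃ w : Nat, window_size = (w : Int) :=
      ⟨window_size.toNat, (Int.toNat_of_nonneg hpos.le).symm⟩
    have hw : 0 < w := by exact_mod_cast hpos
    rw [PySem.Int.floordiv_natCast]
    set k := data.length / w with hk
    -- A = the list of the k full windows
    rw [PySem.List.pyRange_zero_nat, List.foldl_map, PySem.List.foldl_append_singleton_eq_map]
    have hA : (List.range k).map
        (fun j : Nat => PySem.List.slice data (some ((j : Int) * w)) (some (((j : Int) + 1) * w)))
        = (List.range k).map (fun j => (data.drop (j * w)).take w) := by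
      apply List.map_congr_left
      intro j _
      have e1 : ((j : Int) * w) = ((j * w : Nat) : Int) := by push_cast; ring
      have e2 : (((j : Int) + 1) * w) = (((j + 1) * w : Nat) : Int) := by push_cast; ring
      rw [e1, e2, PySem.List.slice_natCast]
      congr 1
      have : (j + 1) * w = j * w + w := by ring
      omega
    rw [hA]
    -- B = the same list, by the scatter invariant starting from the empty buckets
    have hinit : (List.replicate ((k : Int)).toNat ([] : List Int))
        = (List.range k).map (fun g => ((data.take 0).drop (g * w)).take w) := by
      simp [List.map_const', Int.toNat_natCast]
    rw [hinit]
    have := scatter_fold_pos w k hw data data.length 0 (by omega) (by omega)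
    simpa using this.symm
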